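-- pv_equiv track=rewrite | github.com/jakkiiri/ESC190 | exam/2023.py | recover_steps
-- ===== SOURCE A (Python) =====
-- def compute_OPT (cost: list[int], n: int) -> int:
--     OPT = [float('inf')] * (n + 1)
--     OPT[0] = 0
--
--     for x in range(1, n + 1):
--         for s in [1, 2, 3]:
--             if x >= s:
--                 OPT[x] = min(OPT[x], cost[x-1] + OPT[x - s])
--     return OPT
--
-- def recover_steps(cost, n):
--     OPT = compute_OPT(cost, n)
--     # Recover Path
--     path = []
--     while n > 0:
--         for s in [1, 2, 3]:
--             if n >= s and OPT[n] == cost[n - 1] + OPT[n - s]: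
--                 path.append(s)
--                 n -= s
--                 break
--     # Make sure to reverse the path
--     return path[::-1]
-- ===== SOURCE B (Python) =====
-- def recover_steps(cost, n):
--     # Forward DP that records, for each x, the smallest step s achieving the
--     # minimum, then follows the stored choices instead of re-scanning for equality.
--     OPT = [0] * (n + 1)
--     choice = [0] * (n + 1)
--     for x in range(1, n + 1):
--         best = None
--         bs = 0
--         for s in (1, 2, 3):
--             if x >= s and (best is None or OPT[x - s] < best):
--                 best = OPT[x - s]
--                 bs = s
--         OPT[x] = cost[x - 1] + best
--         choice[x] = bs
--     path = []
--     while n > 0: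
--         path.append(choice[n])
--         n -= choice[n]
--     path.reverse()
--     return path
-- ===== Notes on version B (the rewrite author's own statement) =====
-- stated objective: alternative
-- what changed: The path-recovery pass that re-scans s in [1,2,3] for an OPT-equality at every position is replaced by a parent (choice) array recorded during the forward DP (updated only on strict improvement, so the smallest achieving step is stored) and then followed directly; the inf-initialised min-update DP array becomes a plain int array filled left to right.
import Mathlib
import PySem

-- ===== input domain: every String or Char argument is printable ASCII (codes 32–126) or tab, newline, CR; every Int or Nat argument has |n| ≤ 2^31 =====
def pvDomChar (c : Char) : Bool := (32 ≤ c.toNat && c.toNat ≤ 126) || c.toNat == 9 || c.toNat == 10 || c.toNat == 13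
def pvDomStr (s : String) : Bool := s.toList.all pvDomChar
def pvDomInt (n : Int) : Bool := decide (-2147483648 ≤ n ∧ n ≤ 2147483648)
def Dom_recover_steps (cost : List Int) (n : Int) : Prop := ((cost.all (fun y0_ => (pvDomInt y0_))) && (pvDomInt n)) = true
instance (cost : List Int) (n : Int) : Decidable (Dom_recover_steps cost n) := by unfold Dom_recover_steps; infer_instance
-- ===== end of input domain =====

-- B replaces A's equality-re-scan recovery pass with a parent (choice) array recorded
-- during the forward DP and then followed directly; alternative decomposition, same values.

-- ===== PORT A =====
-- float('inf') is modelled by `none : Option Int`; every operation the Python performs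
-- on OPT entries is exact under this model (inf==inf is True, min(inf,v)=v, c+inf=inf).
def pvAddO (c : Int) (o : Option Int) : Option Int := o.map (fun v => c + v)

def pvMinO : Option Int → Option Int → Option Int
  | none, b => b
  | some x, none => some x
  | some x, some y => some (min x y)

def pvAbody (cost : List Int) (x : Int) (OPT : List (Option Int)) (s : Int) : List (Option Int) :=
  if x ≥ s then
    PySem.List.pySetD OPT x (pvMinO (PySem.List.pyGetD OPT x none)
      (pvAddO (PySem.List.pyGetD cost (x - 1) 0) (PySem.List.pyGetD OPT (x - s) none)))
  else OPT

def pvAstep (cost : List Int) (OPT : List (Option Int)) (x : Int) : List (Option Int) :=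
  ([1, 2, 3] : List Int).foldl (pvAbody cost x) OPT

def computeOPT (cost : List Int) (n : Int) : List (Option Int) :=
  (PySem.List.pyRange 1 (n + 1) 1).foldl (pvAstep cost)
    (PySem.List.pySetD (List.replicate (n + 1).toNat (none : Option Int)) 0 (some 0))

def pvFindS (cost : List Int) (OPT : List (Option Int)) (n : Int) : Option Int :=
  ([1, 2, 3] : List Int).find? (fun s =>
    decide (n ≥ s) && (PySem.List.pyGetD OPT n none ==
      pvAddO (PySem.List.pyGetD cost (n - 1) 0) (PySem.List.pyGetD OPT (n - s) none)))

-- the `while n > 0` loop; fuel (= n.toNat) bounds the iterations: Python would loop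
-- forever when no s fires, which cannot happen on inputs satisfying Pre_
def recoverA (cost : List Int) (OPT : List (Option Int)) : Nat → Int → List Int → List Int
  | 0, _, path => path
  | fuel + 1, n, path =>
    if n > 0 then
      match pvFindS cost OPT n with
      | some s => recoverA cost OPT fuel (n - s) (path ++ [s])
      | none => recoverA cost OPT fuel n path
    else path

def recover_steps (cost : List Int) (n : Int) : List Int :=
  (recoverA cost (computeOPT cost n) n.toNat n []).reverse  -- path[::-1]

-- ===== PORT B =====
def pvBbody (OPT : List Int) (x : Int) (b : Option Int × Int) (s : Int) : Option Int × Int :=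
  if x ≥ s then
    match b.1 with
    | none => (some (PySem.List.pyGetD OPT (x - s) 0), s)
    | some v =>
      if PySem.List.pyGetD OPT (x - s) 0 < v then (some (PySem.List.pyGetD OPT (x - s) 0), s)
      else b
  else b

def pvBestStep (OPT : List Int) (x : Int) : Option Int × Int :=
  ([1, 2, 3] : List Int).foldl (pvBbody OPT x) ((none : Option Int), 0)

def pvBstep (cost : List Int) (st : List Int × List Int) (x : Int) : List Int × List Int :=
  let b := pvBestStep st.1 x
  (PySem.List.pySetD st.1 x (PySem.List.pyGetD cost (x - 1) 0 + b.1.getD 0),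
   PySem.List.pySetD st.2 x b.2)

def computeDP (cost : List Int) (n : Int) : List Int × List Int :=
  (PySem.List.pyRange 1 (n + 1) 1).foldl (pvBstep cost)
    (List.replicate (n + 1).toNat (0 : Int), List.replicate (n + 1).toNat (0 : Int))

def followB (choice : List Int) : Nat → Int → List Int → List Int
  | 0, _, path => path
  | fuel + 1, n, path =>
    if n > 0 then
      followB choice fuel (n - PySem.List.pyGetD choice n 0)
        (path ++ [PySem.List.pyGetD choice n 0])
    else path

def recover_steps_alt (cost : List Int) (n : Int) : List Int :=
  (followB (computeDP cost n).2 n.toNat n []).reverse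

-- ===== PRECONDITION & SPEC =====
-- Pre_ excludes exactly the inputs on which the Python A raises IndexError:
-- n < 0 (the OPT[0] = 0 assignment on an empty OPT list) or n > len(cost) (cost[x-1] out of range).
def Pre_recover_steps (cost : List Int) (n : Int) : Prop := 0 ≤ n ∧ n ≤ cost.length
instance (cost : List Int) (n : Int) : Decidable (Pre_recover_steps cost n) := by
  unfold Pre_recover_steps; infer_instance

def pvWitness_recover_steps : List Int × Int := ([2, 1, 3, 1], 4)

def Spec_recover_steps (cost : List Int) (n : Int) (out : List Int) : Prop :=
  out = recover_steps_alt cost n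
instance (cost : List Int) (n : Int) (out : List Int) : Decidable (Spec_recover_steps cost n out) := by
  unfold Spec_recover_steps; infer_instance

-- ===== CLAIM (what is proved, stated in full; the proofs are below) =====
def Claim_equal_recover_steps : Prop := ∀ (cost : List Int) (n : Int),
  Dom_recover_steps cost n → Pre_recover_steps cost n →
  Spec_recover_steps cost n (recover_steps cost n)

-- ===== LEMMAS AND PROOFS =====

-- the common mathematical content of the two DPs: pvV x = minimal cost to reach x,
-- pvM x = min over the reachable predecessors of x, pvC x = the smallest step
-- achieving that minimum (A re-finds it by the equality scan, B stores it)
def pvV (cost : List Int) : Nat → Int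
  | 0 => 0
  | 1 => cost.getD 0 0 + pvV cost 0
  | 2 => cost.getD 1 0 + min (pvV cost 1) (pvV cost 0)
  | (x + 3) => cost.getD (x + 2) 0 +
      min (pvV cost (x + 2)) (min (pvV cost (x + 1)) (pvV cost x))

def pvM (cost : List Int) : Nat → Int
  | 0 => 0
  | 1 => pvV cost 0
  | 2 => min (pvV cost 1) (pvV cost 0)
  | (x + 3) => min (pvV cost (x + 2)) (min (pvV cost (x + 1)) (pvV cost x))

def pvC (cost : List Int) : Nat → Int
  | 0 => 0
  | 1 => 1
  | 2 => if pvV cost 1 ≤ pvV cost 0 then 1 else 2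
  | (x + 3) =>
      if pvV cost (x + 2) ≤ min (pvV cost (x + 1)) (pvV cost x) then 1
      else if pvV cost (x + 1) ≤ pvV cost x then 2 else 3

lemma pvV_succ (cost : List Int) (k : Nat) :
    pvV cost (k + 1) = cost.getD k 0 + pvM cost (k + 1) := by
  rcases k with _ | _ | j <;> simp [pvV, pvM]

lemma pv_rd_left {α : Type} (f : Nat → α) (m i : Nat) (rest : List α) (d : α) (h : i < m) :
    ((List.range m).map f ++ rest).getD i d = f i := by
  rw [List.getD_append _ _ _ _ (by simpa using h)]
  exact PySem.List.getD_map_range f m i d h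

lemma pv_rd_here {α : Type} (f : Nat → α) (m : Nat) (o : α) (rest : List α) (d : α) :
    ((List.range m).map f ++ o :: rest).getD m d = o := by
  have hm : ((List.range m).map f).length = m := by simp
  rw [List.getD_eq_getElem?_getD, List.getElem?_append_right (by omega)]
  simp [hm]

lemma pv_set_here {α : Type} (f : Nat → α) (m : Nat) (o v : α) (rest : List α) :
    ((List.range m).map f ++ o :: rest).set m v = (List.range m).map f ++ v :: rest := by
  have hm : ((List.range m).map f).length = m := by simp
  rw [List.set_append_right _ _ (by omega)]
  simp [hm]

lemma pv_range_snoc {α : Type} (f : Nat → α) (m : Nat) :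
    (List.range (m+1)).map f = (List.range m).map f ++ [f m] := by
  simp [List.range_succ]

-- one write step: from "prefix k+1, hole o" to "prefix k+1, hole (c + min-so-far)"

lemma pv_rdO (cost : List Int) (N i : Nat) (h : i < N + 1) :
    PySem.List.pyGetD ((List.range (N+1)).map (fun j => some (pvV cost j))) ((i:Int)) none
      = some (pvV cost i) := by
  rw [PySem.List.pyGetD_of_nonneg _ _ (by omega), Int.toNat_natCast]
  exact PySem.List.getD_map_range _ _ _ _ h

lemma pvAbody_app (cost : List Int) (k : Nat) (s : Int) (hs : 1 ≤ s) (hsk : s ≤ (k:Int) + 1)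
    (o : Option Int) (rest : List (Option Int)) :
    pvAbody cost ((k : Int) + 1)
      ((List.range (k+1)).map (fun i => some (pvV cost i)) ++ o :: rest) s
    = (List.range (k+1)).map (fun i => some (pvV cost i)) ++
        (pvMinO o (some (cost.getD k 0 + pvV cost (k + 1 - s.toNat)))) :: rest := by
  unfold pvAbody
  rw [if_pos (by omega)]
  rw [PySem.List.pySetD_of_nonneg _ _ (by omega), PySem.List.pyGetD_of_nonneg _ _ (by omega),
      PySem.List.pyGetD_of_nonneg cost 0 (by omega),
      PySem.List.pyGetD_of_nonneg _ _ (by omega : (0:Int) ≤ (k:Int)+1-s)]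
  have e1 : ((k:Int)+1).toNat = k + 1 := by omega
  have e2 : ((k:Int)+1-1).toNat = k := by omega
  have e3 : ((k:Int)+1-s).toNat = k + 1 - s.toNat := by omega
  rw [e1, e2, e3, pv_rd_here, pv_rd_left _ _ _ _ _ (by omega), pv_set_here]
  simp [pvAddO]

lemma pvAbody_skip (_cost : List Int) (x s : Int) (h : ¬ x ≥ s) (OPT : List (Option Int)) :
    pvAbody _cost x OPT s = OPT := by
  unfold pvAbody; rw [if_neg h]

lemma pvAstep_eq (cost : List Int) (N k : Nat) (hk : k < N) :
    pvAstep cost (((List.range (k + 1)).map (fun i => some (pvV cost i))) ++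
        List.replicate (N - k) (none : Option Int)) ((k : Int) + 1)
    = ((List.range (k + 2)).map (fun i => some (pvV cost i))) ++
        List.replicate (N - (k + 1)) none := by
  have hrep : List.replicate (N - k) (none : Option Int)
      = none :: List.replicate (N - (k+1)) none := by
    have h : N - k = (N - (k+1)) + 1 := by omega
    rw [h, List.replicate_succ]
  rw [hrep]
  unfold pvAstep
  simp only [List.foldl_cons, List.foldl_nil]
  rw [pvAbody_app cost k 1 (by omega) (by omega)]
  rcases k with _ | _ | j
  · rw [pvAbody_skip _ _ _ (by norm_num), pvAbody_skip _ _ _ (by norm_num)]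
    rw [pv_range_snoc (m := 1)]
    simp [pvMinO, pvV]
  · rw [pvAbody_app cost 1 2 (by omega) (by norm_num),
        pvAbody_skip _ _ _ (by norm_num)]
    rw [pv_range_snoc (m := 2)]
    have : pvMinO (pvMinO none (some (cost.getD 1 0 + pvV cost (1+1-(1:Int).toNat))))
        (some (cost.getD 1 0 + pvV cost (1+1-(2:Int).toNat))) = some (pvV cost 2) := by
      rw [show (1+1-(1:Int).toNat) = 1 from by norm_num,
          show (1+1-(2:Int).toNat) = 0 from by norm_num]
      simp only [pvMinO]
      rw [min_add_add_left,
          show pvV cost 2 = cost.getD 1 0 + min (pvV cost 1) (pvV cost 0) from by simp [pvV]]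
    rw [this]
    simp
  · rw [pvAbody_app cost (j+2) 2 (by omega) (by push_cast; omega),
        pvAbody_app cost (j+2) 3 (by omega) (by push_cast; omega)]
    rw [pv_range_snoc (m := j+3)]
    have : pvMinO (pvMinO (pvMinO none (some (cost.getD (j+2) 0 + pvV cost (j+2+1-(1:Int).toNat))))
          (some (cost.getD (j+2) 0 + pvV cost (j+2+1-(2:Int).toNat))))
        (some (cost.getD (j+2) 0 + pvV cost (j+2+1-(3:Int).toNat))) = some (pvV cost (j+3)) := by
      rw [show (j+2+1-(1:Int).toNat) = j+2 from by norm_num,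
          show (j+2+1-(2:Int).toNat) = j+1 from by omega,
          show (j+2+1-(3:Int).toNat) = j from by omega]
      simp only [pvMinO]
      rw [min_add_add_left, min_add_add_left, min_assoc,
          show pvV cost (j+3) = cost.getD (j+2) 0 +
            min (pvV cost (j+2)) (min (pvV cost (j+1)) (pvV cost j)) from by rw [pvV]]
    rw [this]
    simp

lemma computeOPT_eq (cost : List Int) (N : Nat) (hN : N ≤ cost.length) :
    computeOPT cost (N : Int) = (List.range (N + 1)).map (fun i => some (pvV cost i)) := by
  unfold computeOPT
  rw [show ((N:Int) + 1).toNat = N + 1 from by omega]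
  have hinit : PySem.List.pySetD (List.replicate (N+1) (none : Option Int)) 0 (some 0)
      = (List.range 1).map (fun i => some (pvV cost i)) ++ List.replicate (N - 0) none := by
    rw [PySem.List.pySetD_of_nonneg _ _ (by norm_num)]
    simp [List.replicate_succ, pvV]
  rw [hinit]
  have h : ∀ k, k ≤ N → (PySem.List.pyRange 1 ((k:Int)+1) 1).foldl (pvAstep cost)
      ((List.range 1).map (fun i => some (pvV cost i)) ++ List.replicate (N - 0) none)
      = (List.range (k+1)).map (fun i => some (pvV cost i)) ++ List.replicate (N - k) none := by
    intro k hk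
    induction k with
    | zero =>
      rw [PySem.List.pyRange_one_eq_nil (by norm_num)]
      simp
    | succ k ih =>
      rw [show (((k+1:Nat)):Int)+1 = (((k:Int)+1)+1) from by push_cast; ring,
          PySem.List.pyRange_one_succ_right (by omega), List.foldl_append, ih (by omega)]
      simpa using pvAstep_eq cost N k (by omega)
  have := h N (le_refl N)
  rw [show ((N:Int)+1) = (N:Int)+1 from rfl] at this
  rw [this]
  simp

lemma pvBbody_none (cost : List Int) (k : Nat) (s : Int) (hs : 1 ≤ s) (hsk : s ≤ (k:Int) + 1)
    (t : Int) (rest : List Int) :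
    pvBbody ((List.range (k+1)).map (pvV cost) ++ rest) ((k : Int) + 1) (none, t) s
    = (some (pvV cost (k + 1 - s.toNat)), s) := by
  unfold pvBbody
  rw [if_pos (by omega)]
  simp only
  rw [PySem.List.pyGetD_of_nonneg _ _ (by omega),
      show ((k:Int)+1-s).toNat = k + 1 - s.toNat from by omega,
      pv_rd_left _ _ _ _ _ (by omega)]

lemma pvBbody_some (cost : List Int) (k : Nat) (s : Int) (hs : 1 ≤ s) (hsk : s ≤ (k:Int) + 1)
    (v t : Int) (rest : List Int) :
    pvBbody ((List.range (k+1)).map (pvV cost) ++ rest) ((k : Int) + 1) (some v, t) s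
    = (if pvV cost (k + 1 - s.toNat) < v then (some (pvV cost (k + 1 - s.toNat)), s)
       else (some v, t)) := by
  unfold pvBbody
  rw [if_pos (by omega)]
  simp only
  rw [PySem.List.pyGetD_of_nonneg _ _ (by omega),
      show ((k:Int)+1-s).toNat = k + 1 - s.toNat from by omega,
      pv_rd_left _ _ _ _ _ (by omega)]

lemma pvBbody_skip (OPT : List Int) (x s : Int) (h : ¬ x ≥ s) (b : Option Int × Int) :
    pvBbody OPT x b s = b := by
  unfold pvBbody; rw [if_neg h]

lemma pvBestStep_eq (cost : List Int) (k : Nat) (rest : List Int) :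
    pvBestStep ((List.range (k+1)).map (pvV cost) ++ rest) ((k : Int) + 1)
    = (some (pvM cost (k + 1)), pvC cost (k + 1)) := by
  unfold pvBestStep
  simp only [List.foldl_cons, List.foldl_nil]
  rw [pvBbody_none cost k 1 (by omega) (by omega)]
  rcases k with _ | _ | j
  · rw [pvBbody_skip _ _ _ (by norm_num), pvBbody_skip _ _ _ (by norm_num)]
    simp [pvM, pvC]
  · rw [pvBbody_some cost 1 2 (by omega) (by norm_num),
        pvBbody_skip _ _ _ (by norm_num)]
    rw [show (1+1-(1:Int).toNat) = 1 from by omega, show (1+1-(2:Int).toNat) = 0 from by omega]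
    by_cases h : pvV cost 0 < pvV cost 1
    · rw [if_pos h]
      rw [show pvM cost 2 = min (pvV cost 1) (pvV cost 0) from by simp [pvM],
          show pvC cost 2 = if pvV cost 1 ≤ pvV cost 0 then 1 else 2 from by simp [pvC],
          min_eq_right (by omega), if_neg (by omega)]
    · rw [if_neg h]
      rw [show pvM cost 2 = min (pvV cost 1) (pvV cost 0) from by simp [pvM],
          show pvC cost 2 = if pvV cost 1 ≤ pvV cost 0 then 1 else 2 from by simp [pvC],
          min_eq_left (by omega), if_pos (by omega)]
  · rw [pvBbody_some cost (j+2) 2 (by omega) (by push_cast; omega)]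
    rw [show (j+2+1-(1:Int).toNat) = j+2 from by omega, show (j+2+1-(2:Int).toNat) = j+1 from by omega]
    have hM : pvM cost (j+3) = min (pvV cost (j+2)) (min (pvV cost (j+1)) (pvV cost j)) := by
      simp [pvM]
    have hC : pvC cost (j+3) = (if pvV cost (j+2) ≤ min (pvV cost (j+1)) (pvV cost j) then 1
        else if pvV cost (j+1) ≤ pvV cost j then 2 else 3) := by
      simp [pvC]
    by_cases h1 : pvV cost (j+1) < pvV cost (j+2)
    · rw [if_pos h1, pvBbody_some cost (j+2) 3 (by omega) (by push_cast; omega),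
          show (j+2+1-(3:Int).toNat) = j from by omega]
      by_cases h2 : pvV cost j < pvV cost (j+1)
      · rw [if_pos h2, hM, hC, min_eq_right (show pvV cost j ≤ pvV cost (j+1) from by omega),
            min_eq_right (show pvV cost j ≤ pvV cost (j+2) from by omega),
            if_neg (by omega), if_neg (by omega)]
      · rw [if_neg h2, hM, hC, min_eq_left (show pvV cost (j+1) ≤ pvV cost j from by omega),
            min_eq_right (show pvV cost (j+1) ≤ pvV cost (j+2) from by omega),
            if_neg (by omega), if_pos (by omega)]
    · rw [if_neg h1, pvBbody_some cost (j+2) 3 (by omega) (by push_cast; omega),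
          show (j+2+1-(3:Int).toNat) = j from by omega]
      by_cases h2 : pvV cost j < pvV cost (j+2)
      · rw [if_pos h2, hM, hC, min_eq_right (show pvV cost j ≤ pvV cost (j+1) from by omega),
            min_eq_right (show pvV cost j ≤ pvV cost (j+2) from by omega),
            if_neg (by omega), if_neg (by omega)]
      · rw [if_neg h2, hM, hC,
            min_eq_left (le_min (by omega) (by omega)), if_pos (le_min (by omega) (by omega))]

lemma pvBstep_eq (cost : List Int) (N k : Nat) (hk : k < N) :
    pvBstep cost
      (((List.range (k + 1)).map (pvV cost)) ++ List.replicate (N - k) (0 : Int),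
       ((List.range (k + 1)).map (pvC cost)) ++ List.replicate (N - k) (0 : Int))
      ((k : Int) + 1)
    = (((List.range (k + 2)).map (pvV cost)) ++ List.replicate (N - (k + 1)) (0 : Int),
       ((List.range (k + 2)).map (pvC cost)) ++ List.replicate (N - (k + 1)) (0 : Int)) := by
  have hrep : List.replicate (N - k) (0 : Int) = 0 :: List.replicate (N - (k+1)) 0 := by
    rw [show N - k = (N - (k+1)) + 1 from by omega, List.replicate_succ]
  unfold pvBstep
  simp only [hrep, pvBestStep_eq cost k]
  rw [PySem.List.pySetD_of_nonneg _ _ (by omega), PySem.List.pySetD_of_nonneg _ _ (by omega),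
      PySem.List.pyGetD_of_nonneg cost 0 (by omega),
      show ((k:Int)+1).toNat = k + 1 from by omega,
      show ((k:Int)+1-1).toNat = k from by omega,
      pv_set_here, pv_set_here, pv_range_snoc (f := pvV cost) (m := k+1),
      pv_range_snoc (f := pvC cost) (m := k+1)]
  simp only [Option.getD_some, Prod.mk.injEq]
  constructor
  · rw [← pvV_succ]; simp
  · simp

lemma computeDP_eq (cost : List Int) (N : Nat) (_hN : N ≤ cost.length) :
    computeDP cost (N : Int) =
      ((List.range (N + 1)).map (pvV cost), (List.range (N + 1)).map (pvC cost)) := by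
  unfold computeDP
  rw [show ((N:Int) + 1).toNat = N + 1 from by omega]
  have hinit : (List.replicate (N+1) (0:Int), List.replicate (N+1) (0:Int))
      = ((List.range 1).map (pvV cost) ++ List.replicate (N - 0) (0:Int),
         (List.range 1).map (pvC cost) ++ List.replicate (N - 0) (0:Int)) := by
    simp [List.replicate_succ, pvV, pvC]
  rw [hinit]
  have h : ∀ k, k ≤ N → (PySem.List.pyRange 1 ((k:Int)+1) 1).foldl (pvBstep cost)
      ((List.range 1).map (pvV cost) ++ List.replicate (N - 0) (0:Int),
       (List.range 1).map (pvC cost) ++ List.replicate (N - 0) (0:Int))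
      = ((List.range (k+1)).map (pvV cost) ++ List.replicate (N - k) (0:Int),
         (List.range (k+1)).map (pvC cost) ++ List.replicate (N - k) (0:Int)) := by
    intro k hk
    induction k with
    | zero =>
      rw [PySem.List.pyRange_one_eq_nil (by norm_num)]
      simp
    | succ k ih =>
      rw [show (((k+1:Nat)):Int)+1 = (((k:Int)+1)+1) from by push_cast; ring,
          PySem.List.pyRange_one_succ_right (by omega), List.foldl_append, ih (by omega)]
      simpa using pvBstep_eq cost N k (by omega)
  have := h N (le_refl N)
  rw [this]
  simp

lemma pvFindS_eq (cost : List Int) (N t : Nat) (hx1 : 1 ≤ t) (hxN : t ≤ N) :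
    pvFindS cost ((List.range (N + 1)).map (fun i => some (pvV cost i))) (t : Int)
      = some (pvC cost t) := by
  obtain ⟨u, rfl⟩ : ∃ u, t = u + 1 := ⟨t - 1, by omega⟩
  unfold pvFindS
  have hb : ∀ s : Int, 1 ≤ s → s ≤ (u:Int) + 1 →
      (decide (((u+1:Nat):Int) ≥ s) &&
        (PySem.List.pyGetD ((List.range (N+1)).map (fun i => some (pvV cost i))) ((u+1:Nat):Int) none ==
          pvAddO (PySem.List.pyGetD cost (((u+1:Nat):Int) - 1) 0)
            (PySem.List.pyGetD ((List.range (N+1)).map (fun i => some (pvV cost i))) (((u+1:Nat):Int) - s) none)))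
      = decide (pvM cost (u+1) = pvV cost (u + 1 - s.toNat)) := by
    intro s hs hsu
    rw [pv_rdO cost N (u+1) (by omega),
        show (((u+1:Nat):Int) - s) = ((u + 1 - s.toNat : Nat) : Int) from by push_cast; omega,
        pv_rdO cost N (u+1-s.toNat) (by omega),
        PySem.List.pyGetD_of_nonneg cost 0 (by push_cast; omega),
        show ((((u+1:Nat)):Int) - 1).toNat = u from by push_cast; omega]
    rw [decide_eq_true (by push_cast; omega : ((u+1:Nat):Int) ≥ s), Bool.true_and]
    simp only [pvAddO, Option.map_some]
    rw [pvV_succ cost u]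
    by_cases he : pvM cost (u+1) = pvV cost (u + 1 - s.toNat)
    · simp [he]
    · have hne : cost.getD u 0 + pvM cost (u+1) ≠ cost.getD u 0 + pvV cost (u + 1 - s.toNat) := by
        omega
      simp [he, hne]
  rcases u with _ | _ | j
  · rw [List.find?_cons_of_pos (by rw [hb 1 (by omega) (by omega)]; simp [pvM])]
    simp [pvC]
  · by_cases h : pvV cost 1 ≤ pvV cost 0
    · rw [List.find?_cons_of_pos (by
        rw [hb 1 (by omega) (by norm_num)]
        simp only [show (1+1-(1:Int).toNat) = 1 from by omega]
        simp [pvM, min_eq_left h])]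
      rw [show pvC cost 2 = 1 from by simp [pvC]; omega]
    · rw [List.find?_cons_of_neg (by
        rw [hb 1 (by omega) (by norm_num)]
        simp only [show (1+1-(1:Int).toNat) = 1 from by omega]
        simp [pvM, min_eq_right (show pvV cost 0 ≤ pvV cost 1 from by omega)]
        omega)]
      rw [List.find?_cons_of_pos (by
        rw [hb 2 (by omega) (by norm_num)]
        simp only [show (1+1-(2:Int).toNat) = 0 from by omega]
        simp [pvM, min_eq_right (show pvV cost 0 ≤ pvV cost 1 from by omega)])]
      rw [show pvC cost 2 = 2 from by simp [pvC]; omega]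
  · have hM : pvM cost (j+3) = min (pvV cost (j+2)) (min (pvV cost (j+1)) (pvV cost j)) := by
      simp [pvM]
    have hC : pvC cost (j+3) = (if pvV cost (j+2) ≤ min (pvV cost (j+1)) (pvV cost j) then 1
        else if pvV cost (j+1) ≤ pvV cost j then 2 else 3) := by
      simp [pvC]
    by_cases c1 : pvV cost (j+2) ≤ min (pvV cost (j+1)) (pvV cost j)
    · rw [List.find?_cons_of_pos (by
        rw [hb 1 (by omega) (by push_cast; omega)]
        simp only [show (j+2+1-(1:Int).toNat) = j+2 from by omega]
        simp [hM, min_eq_left c1])]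
      rw [hC, if_pos c1]
    · have hx : min (pvV cost (j+1)) (pvV cost j) < pvV cost (j+2) := not_le.mp c1
      have hmr : min (pvV cost (j+2)) (min (pvV cost (j+1)) (pvV cost j))
          = min (pvV cost (j+1)) (pvV cost j) := min_eq_right hx.le
      have hp1 : ¬ (pvM cost (j+3) = pvV cost (j+2)) := by
        rw [hM, hmr]; omega
      rw [List.find?_cons_of_neg (by
        rw [hb 1 (by omega) (by push_cast; omega)]
        simp only [show (j+2+1-(1:Int).toNat) = j+2 from by omega]
        simpa using hp1)]
      by_cases c2 : pvV cost (j+1) ≤ pvV cost j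
      · have hx2 : pvV cost (j+1) < pvV cost (j+2) := by rwa [min_eq_left c2] at hx
        rw [List.find?_cons_of_pos (by
          rw [hb 2 (by omega) (by push_cast; omega)]
          simp only [show (j+2+1-(2:Int).toNat) = j+1 from by omega]
          rw [hM, min_eq_left c2, min_eq_right hx2.le]
          simp)]
        rw [hC, if_neg c1, if_pos c2]
      · have hx3 : pvV cost j < pvV cost (j+2) := by
          rwa [min_eq_right (show pvV cost j ≤ pvV cost (j+1) from by omega)] at hx
        have hp2 : ¬ (pvM cost (j+3) = pvV cost (j+1)) := by
          rw [hM, min_eq_right (show pvV cost j ≤ pvV cost (j+1) from by omega),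
              min_eq_right hx3.le]
          omega
        rw [List.find?_cons_of_neg (by
          rw [hb 2 (by omega) (by push_cast; omega)]
          simp only [show (j+2+1-(2:Int).toNat) = j+1 from by omega]
          simpa using hp2)]
        rw [List.find?_cons_of_pos (by
          rw [hb 3 (by omega) (by push_cast; omega)]
          simp only [show (j+2+1-(3:Int).toNat) = j from by omega]
          rw [hM, min_eq_right (show pvV cost j ≤ pvV cost (j+1) from by omega),
              min_eq_right hx3.le]
          simp)]
        rw [hC, if_neg c1, if_neg c2]

lemma pvC_bounds (cost : List Int) (x : Nat) (hx : 1 ≤ x) :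
    1 ≤ pvC cost x ∧ pvC cost x ≤ 3 ∧ pvC cost x ≤ (x : Int) := by
  rcases x with _ | _ | _ | j
  · omega
  · simp [pvC]
  · rw [show pvC cost 2 = if pvV cost 1 ≤ pvV cost 0 then 1 else 2 from by simp [pvC]]
    split_ifs <;> constructor <;> norm_num
  · rw [show pvC cost (j+3) = (if pvV cost (j+2) ≤ min (pvV cost (j+1)) (pvV cost j) then 1
        else if pvV cost (j+1) ≤ pvV cost j then 2 else 3) from by simp [pvC]]
    split_ifs <;> refine ⟨by norm_num, by norm_num, by push_cast; omega⟩

lemma pvLoop_eq (cost : List Int) (N : Nat) :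
    ∀ (fuel : Nat) (m : Int) (path : List Int), 0 ≤ m → m ≤ (N : Int) →
      recoverA cost ((List.range (N + 1)).map (fun i => some (pvV cost i))) fuel m path
      = followB ((List.range (N + 1)).map (pvC cost)) fuel m path := by
  intro fuel
  induction fuel with
  | zero => intro m path _ _; rfl
  | succ fuel ih =>
    intro m path hm0 hmN
    rw [recoverA, followB]
    by_cases hm : m > 0
    · rw [if_pos hm, if_pos hm]
      obtain ⟨t, rfl⟩ : ∃ t : Nat, m = (t : Int) := ⟨m.toNat, by omega⟩
      have ht1 : 1 ≤ t := by omega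
      have htN : t ≤ N := by omega
      rw [pvFindS_eq cost N t ht1 htN]
      have hch : PySem.List.pyGetD ((List.range (N+1)).map (pvC cost)) ((t:Int)) 0
          = pvC cost t := by
        rw [PySem.List.pyGetD_of_nonneg _ _ (by omega), Int.toNat_natCast]
        exact PySem.List.getD_map_range _ _ _ _ (by omega)
      rw [hch]
      obtain ⟨h1, h2, h3⟩ := pvC_bounds cost t ht1
      exact ih ((t:Int) - pvC cost t) (path ++ [pvC cost t]) (by omega) (by omega)
    · rw [if_neg hm, if_neg hm]

-- ===== VERDICT (by name: the statement is the Claim_ definition above) =====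
theorem recover_steps_spec : Claim_equal_recover_steps := by
  intro cost n _ hpre
  have hp := hpre
  unfold Pre_recover_steps at hp
  obtain ⟨hn0, hnl⟩ := hp
  unfold Spec_recover_steps recover_steps recover_steps_alt
  obtain ⟨N, rfl⟩ : ∃ N : Nat, n = (N : Int) := ⟨n.toNat, (Int.toNat_of_nonneg hn0).symm⟩
  have hN : N ≤ cost.length := by exact_mod_cast hnl
  rw [computeOPT_eq cost N hN, computeDP_eq cost N hN]
  rw [pvLoop_eq cost N ((N : Int)).toNat (N : Int) [] (by positivity) (le_refl _)]
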